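-- pv_equiv track=rewrite | github.com/Lewis121025/Aurora | tests/test_repository_audit.py | _makefile_targets
-- ===== SOURCE A (Python) =====
-- def _makefile_targets(makefile: str) -> dict[str, list[str]]:
--     targets: dict[str, list[str]] = {}
--     current: str | None = None
--     for raw_line in makefile.splitlines():
--         if raw_line.startswith("\t") and current is not None:
--             targets[current].append(raw_line.strip())
--             continue
--         current = None
--         if ":" not in raw_line or raw_line.startswith(".") or raw_line.startswith("#"):
--             continue
--         target, _, _ = raw_line.partition(":")
--         if not target or " " in target:
--             continue
--         current = target
--         targets[current] = []
--     return targets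
-- ===== SOURCE B (Python) =====
-- def _makefile_targets(makefile: str) -> dict[str, list[str]]:
--     # Block-based parse: each valid header line grabs the tab lines right after it
--     # as its recipe; everything else is skipped line by line.
--     targets: dict[str, list[str]] = {}
--     lines = makefile.splitlines()
--     i, n = 0, len(lines)
--     while i < n:
--         header = lines[i]
--         i += 1
--         target, sep, _ = header.partition(":")
--         if not sep or header.startswith((".", "#")) or not target or " " in target:
--             continue
--         recipe = []
--         while i < n and lines[i].startswith("\t"):
--             recipe.append(lines[i].strip())
--             i += 1
--         targets[target] = recipe
--     return targets
-- ===== Notes on version B (the rewrite author's own statement) =====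
-- stated objective: alternative
-- what changed: Replaced A's per-line state machine (a 'current target' carried across lines, appending each tab line as it is seen) by a block-structured parse: each valid header line consumes its whole run of following tab lines at once as the recipe and is inserted with it in one step.
import Mathlib
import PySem

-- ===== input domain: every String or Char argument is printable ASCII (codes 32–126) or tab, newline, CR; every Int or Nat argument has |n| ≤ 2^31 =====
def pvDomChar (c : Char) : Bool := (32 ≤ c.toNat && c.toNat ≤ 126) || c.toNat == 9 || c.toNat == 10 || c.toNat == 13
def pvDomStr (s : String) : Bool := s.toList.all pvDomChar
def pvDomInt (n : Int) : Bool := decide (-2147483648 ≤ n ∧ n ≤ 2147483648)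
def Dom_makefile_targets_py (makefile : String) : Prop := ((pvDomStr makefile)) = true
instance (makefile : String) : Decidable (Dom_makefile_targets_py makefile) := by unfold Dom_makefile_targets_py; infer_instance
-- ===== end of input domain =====

-- B parses the makefile block-wise (each valid header grabs its following tab lines at once)
-- instead of A's per-line state machine; objective: alternative decomposition, same cost.

-- raw_line.partition(":")[0] — hand port (exact: the characters before the first ':',
-- or the whole string when ':' is absent; both Pythons call str.partition the same way)
def pvPartFst (s : String) : String := String.ofList (s.toList.takeWhile (· ≠ ':'))

-- ===== PORT A =====
def pvStepA (st : PySem.Dict String (List String) × Option String) (raw_line : String) :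
    PySem.Dict String (List String) × Option String :=
  if PySem.Str.startswith raw_line "\t" && st.2.isSome then
    match st.2 with
    | some cur => (st.1.modify cur [] (· ++ [PySem.Str.strip raw_line]), some cur)
    | none => (st.1, none)   -- unreachable: guard requires st.2.isSome
  else
    -- current = None
    if !(PySem.Str.isIn ":" raw_line) || PySem.Str.startswith raw_line "." ||
        PySem.Str.startswith raw_line "#" then (st.1, none)
    else
      let target := pvPartFst raw_line
      if PySem.Str.len target == 0 || PySem.Str.isIn " " target then (st.1, none)
      else (st.1.insert target [], some target)

def makefile_targets_py (makefile : String) : List (String × List String) :=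
  (((PySem.Str.splitlines makefile).foldl pvStepA (PySem.Dict.empty, none)).1).items

-- ===== PORT B =====
def pvValidHeader (header : String) : Bool :=
  !(!(PySem.Str.isIn ":" header) || PySem.Str.startswith header "." ||
    PySem.Str.startswith header "#" || PySem.Str.len (pvPartFst header) == 0 ||
    PySem.Str.isIn " " (pvPartFst header))

-- the inner while loop of B: collect the stripped tab lines, return them with the rest
def pvCollectRecipe : List String → List String × List String
  | [] => ([], [])
  | l :: ls =>
    if PySem.Str.startswith l "\t" then
      let p := pvCollectRecipe ls
      (PySem.Str.strip l :: p.1, p.2)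
    else ([], l :: ls)

theorem pvCollectRecipe_snd_length : ∀ ls : List String, (pvCollectRecipe ls).2.length ≤ ls.length := by
  intro ls
  induction ls with
  | nil => simp [pvCollectRecipe]
  | cons l ls ih =>
    simp only [pvCollectRecipe]
    split
    · exact le_trans ih (Nat.le_succ _)
    · simp

def pvBlocks (d : PySem.Dict String (List String)) : List String → PySem.Dict String (List String)
  | [] => d
  | h :: ls =>
    if pvValidHeader h then
      let p := pvCollectRecipe ls
      pvBlocks (d.insert (pvPartFst h) p.1) p.2
    else pvBlocks d ls
termination_by ls => ls.length
decreasing_by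
  · exact Nat.lt_succ_of_le (pvCollectRecipe_snd_length ls)
  · simp

def makefile_targets_py_alt (makefile : String) : List (String × List String) :=
  (pvBlocks PySem.Dict.empty (PySem.Str.splitlines makefile)).items

-- ===== PRECONDITION & SPEC =====
def Spec_makefile_targets_py (makefile : String) (out : List (String × List String)) : Prop := out = makefile_targets_py_alt makefile
instance (makefile : String) (out : List (String × List String)) : Decidable (Spec_makefile_targets_py makefile out) := by unfold Spec_makefile_targets_py; infer_instance

-- ===== CLAIM (what is proved, stated in full; the proofs are below) =====
def Claim_equal_makefile_targets_py : Prop := ∀ (makefile : String), Dom_makefile_targets_py makefile → Spec_makefile_targets_py makefile (makefile_targets_py makefile)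

-- ===== LEMMAS AND PROOFS =====

-- A's step from `current = None` is exactly: insert-and-set on a valid header, skip otherwise
theorem pvStepA_none (d : PySem.Dict String (List String)) (h : String) :
    pvStepA (d, none) h
      = if pvValidHeader h then (d.insert (pvPartFst h) [], some (pvPartFst h)) else (d, none) := by
  simp only [pvStepA, pvValidHeader, Option.isSome_none, Bool.and_false, Bool.false_eq_true,
    if_false]
  split_ifs <;> simp_all

-- on a non-tab line the step ignores `current`
theorem pvStepA_non_tab (d : PySem.Dict String (List String)) (cur : Option String) (l : String)
    (hl : PySem.Str.startswith l "\t" = false) :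
    pvStepA (d, cur) l = pvStepA (d, none) l := by
  have hl' : PySem.Chars.startswith l.toList ['\t'] = false := by simpa using hl
  simp [pvStepA, hl']

-- during a run of tab lines, A appends each stripped line to the current target's entry;
-- collectively that is one insert of the whole recipe
theorem pvTabRun : ∀ (ls : List String) (d : PySem.Dict String (List String)) (t : String) (acc : List String),
    ls.foldl pvStepA (d.insert t acc, some t)
      = (pvCollectRecipe ls).2.foldl pvStepA (d.insert t (acc ++ (pvCollectRecipe ls).1), some t) := by
  intro ls
  induction ls with
  | nil => intro d t acc; simp [pvCollectRecipe]
  | cons l ls ih =>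
    intro d t acc
    by_cases hl : PySem.Str.startswith l "\t" = true
    · have hl' : PySem.Chars.startswith l.toList ['\t'] = true := by simpa using hl
      have hstep : pvStepA (d.insert t acc, some t) l
          = (d.insert t (acc ++ [PySem.Str.strip l]), some t) := by
        simp only [pvStepA, Option.isSome_some, Bool.and_true]
        simp [hl', PySem.Dict.modify, PySem.Dict.getD_insert_self, PySem.Dict.insert_insert_self]
      rw [List.foldl_cons, hstep, ih]
      simp only [pvCollectRecipe, hl, if_pos]
      simp
    · rw [Bool.not_eq_true] at hl
      simp only [pvCollectRecipe, hl, Bool.false_eq_true, if_false]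
      simp

-- the remainder returned by pvCollectRecipe never starts with a tab line
theorem pvCollectRecipe_snd_head : ∀ (ls : List String) (l : String) (rest : List String),
    (pvCollectRecipe ls).2 = l :: rest → PySem.Str.startswith l "\t" = false := by
  intro ls
  induction ls with
  | nil => intro l rest heq; simp [pvCollectRecipe] at heq
  | cons a as iha =>
    intro l rest heq
    simp only [pvCollectRecipe] at heq
    by_cases ha : PySem.Str.startswith a "\t" = true
    · simp only [ha, if_pos] at heq
      exact iha l rest heq
    · rw [Bool.not_eq_true] at ha
      simp only [ha, Bool.false_eq_true, if_false] at heq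
      obtain ⟨rfl, rfl⟩ := List.cons.inj heq
      exact ha

-- main invariant: from `current = None`, A's per-line machine computes B's block parse
theorem pvMain : ∀ (n : Nat) (ls : List String), ls.length ≤ n → ∀ d : PySem.Dict String (List String),
    (ls.foldl pvStepA (d, none)).1 = pvBlocks d ls := by
  intro n
  induction n with
  | zero =>
    intro ls hls d
    have : ls = [] := List.eq_nil_of_length_eq_zero (Nat.le_zero.mp hls)
    subst this; simp [pvBlocks]
  | succ n ih =>
    intro ls hls d
    match ls with
    | [] => simp [pvBlocks]
    | h :: ls =>
      simp only [List.length_cons, Nat.succ_le_succ_iff] at hls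
      rw [List.foldl_cons, pvStepA_none]
      by_cases hv : pvValidHeader h = true
      · rw [if_pos hv, pvTabRun ls d (pvPartFst h) []]
        simp only [List.nil_append]
        have hdrop : ((pvCollectRecipe ls).2.foldl pvStepA
              (d.insert (pvPartFst h) (pvCollectRecipe ls).1, some (pvPartFst h))).1
            = ((pvCollectRecipe ls).2.foldl pvStepA
              (d.insert (pvPartFst h) (pvCollectRecipe ls).1, none)).1 := by
          match hr : (pvCollectRecipe ls).2 with
          | [] => rfl
          | l :: rest =>
            rw [List.foldl_cons, List.foldl_cons,
              pvStepA_non_tab _ _ _ (pvCollectRecipe_snd_head ls l rest hr)]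
        rw [hdrop, ih _ (le_trans (pvCollectRecipe_snd_length ls) hls) _]
        conv_rhs => rw [pvBlocks]
        rw [if_pos hv]
      · rw [Bool.not_eq_true] at hv
        rw [if_neg (by simp [hv]), ih _ hls _]
        conv_rhs => rw [pvBlocks]
        rw [if_neg (by simp [hv])]

-- ===== VERDICT (by name: the statement is the Claim_ definition above) =====
theorem makefile_targets_py_spec : Claim_equal_makefile_targets_py := by
  intro makefile _
  unfold Spec_makefile_targets_py makefile_targets_py makefile_targets_py_alt
  rw [pvMain (PySem.Str.splitlines makefile).length _ le_rfl]
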